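-- pv_equiv track=rewrite | github.com/ReadyDynamic/ReadyDynamic | dynamic_info_fix/dynamic_info_fix.py | token_aware_sample
-- ===== SOURCE A (Python) =====
-- def estimate_tokens(text: str) -> int:
--     return max(1, len(text) // 4)
--
-- def token_aware_sample(values: list[str], max_tokens=30000, min_samples: int = 5):
--     sorted_values = sorted(values, key=len)
--
--     sampled = []
--     token_sum = 0
--
--     for v in sorted_values:
--         t = estimate_tokens(v)
--         if token_sum + t > max_tokens:
--             break
--         sampled.append(v)
--         token_sum += t
--
--     if len(sampled) < min_samples:
--         sampled = sorted_values[:min_samples]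
--
--     return sampled
-- ===== SOURCE B (Python) =====
-- def estimate_tokens(text: str) -> int:
--     return max(1, len(text) // 4)
--
-- def token_aware_sample(values: list[str], max_tokens=30000, min_samples: int = 5):
--     sorted_values = sorted(values, key=len)
--
--     # prefix sums of the token estimates over the length-sorted values
--     cums = []
--     total = 0
--     for v in sorted_values:
--         total += estimate_tokens(v)
--         cums.append(total)
--
--     # bisect_right: first index whose prefix sum exceeds max_tokens
--     lo, hi = 0, len(cums)
--     while lo < hi:
--         mid = (lo + hi) // 2
--         if max_tokens < cums[mid]:
--             hi = mid
--         else: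
--             lo = mid + 1
--
--     sampled = sorted_values[:lo]
--     if len(sampled) < min_samples:
--         sampled = sorted_values[:min_samples]
--     return sampled
-- ===== Notes on version B (the rewrite author's own statement) =====
-- stated objective: alternative
-- what changed: Replaces A's greedy accumulate-and-break scan with a prefix-sum table over the length-sorted values plus a bisect_right-style binary search for the cutoff index, then slices; the min_samples fallback is unchanged.
import Mathlib
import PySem

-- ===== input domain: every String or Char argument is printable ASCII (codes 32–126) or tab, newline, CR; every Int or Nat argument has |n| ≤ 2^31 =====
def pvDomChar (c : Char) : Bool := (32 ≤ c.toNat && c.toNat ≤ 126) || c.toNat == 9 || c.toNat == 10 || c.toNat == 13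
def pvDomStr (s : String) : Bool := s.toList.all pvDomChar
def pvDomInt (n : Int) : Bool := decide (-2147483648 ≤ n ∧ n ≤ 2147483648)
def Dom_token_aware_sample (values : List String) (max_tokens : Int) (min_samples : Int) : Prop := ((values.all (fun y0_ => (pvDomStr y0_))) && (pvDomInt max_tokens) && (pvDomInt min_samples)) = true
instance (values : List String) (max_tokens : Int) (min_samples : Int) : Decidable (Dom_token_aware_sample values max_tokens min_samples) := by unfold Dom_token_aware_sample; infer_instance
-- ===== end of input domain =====

-- B replaces A's greedy accumulate-and-break scan with a prefix-sum table plus a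
-- bisect_right binary search for the cutoff (alternative decomposition, same cost).

-- ===== PORT A =====
-- estimate_tokens(text) = max(1, len(text) // 4)  (shared module helper)
def pvTok (s : String) : Int := max 1 (PySem.Int.floordiv (PySem.Str.len s) 4)

-- A's for-loop with break: state (sampled, token_sum)
def pvGoA (M : Int) : List String → List String → Int → List String
  | [], sampled, _ => sampled
  | v :: rest, sampled, tsum =>
    let t := pvTok v
    if tsum + t > M then sampled
    else pvGoA M rest (sampled ++ [v]) (tsum + t)

def token_aware_sample (values : List String) (max_tokens : Int) (min_samples : Int) : List String :=
  let sorted_values := PySem.List.sorted values (fun v => PySem.Str.len v)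
  let sampled := pvGoA max_tokens sorted_values [] 0
  if PySem.List.len sampled < min_samples then
    PySem.List.slice sorted_values none (some min_samples)
  else sampled

-- ===== PORT B =====
-- B's cums-building loop: running total, appending each prefix sum
def pvCums : List String → Int → List Int
  | [], _ => []
  | v :: rest, total =>
    let total' := total + pvTok v
    total' :: pvCums rest total'

def token_aware_sample_alt (values : List String) (max_tokens : Int) (min_samples : Int) : List String :=
  let sorted_values := PySem.List.sorted values (fun v => PySem.Str.len v)
  let cums := pvCums sorted_values 0
  -- B's hand-written while-loop is exactly Python's bisect_right; ported as PySem.List.bisectRight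
  let cutoff := PySem.List.bisectRight cums max_tokens
  let sampled := PySem.List.slice sorted_values none (some (cutoff : Int))
  if PySem.List.len sampled < min_samples then
    PySem.List.slice sorted_values none (some min_samples)
  else sampled

-- ===== PRECONDITION & SPEC =====
def Spec_token_aware_sample (values : List String) (max_tokens : Int) (min_samples : Int) (out : List String) : Prop := out = token_aware_sample_alt values max_tokens min_samples
instance (values : List String) (max_tokens : Int) (min_samples : Int) (out : List String) : Decidable (Spec_token_aware_sample values max_tokens min_samples out) := by unfold Spec_token_aware_sample; infer_instance

-- ===== CLAIM (what is proved, stated in full; the proofs are below) =====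
def Claim_equal_token_aware_sample : Prop := ∀ (values : List String) (max_tokens : Int) (min_samples : Int), Dom_token_aware_sample values max_tokens min_samples → Spec_token_aware_sample values max_tokens min_samples (token_aware_sample values max_tokens min_samples)

-- ===== LEMMAS AND PROOFS =====

-- number of elements A's greedy loop takes from l starting at running sum tsum
def pvCnt (M : Int) : List String → Int → Nat
  | [], _ => 0
  | v :: rest, tsum => if tsum + pvTok v > M then 0 else pvCnt M rest (tsum + pvTok v) + 1

lemma pvTok_pos (s : String) : 1 ≤ pvTok s := le_max_left _ _

@[simp] lemma length_pvCums (l : List String) (t : Int) : (pvCums l t).length = l.length := by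
  induction l generalizing t with
  | nil => rfl
  | cons v rest ih => simp [pvCums, ih]

lemma pvCums_lt (l : List String) (t : Int) : ∀ c ∈ pvCums l t, t < c := by
  induction l generalizing t with
  | nil => intro c hc; simp [pvCums] at hc
  | cons v rest ih =>
    intro c hc
    simp only [pvCums, List.mem_cons] at hc
    have h1 : t < t + pvTok v := by have := pvTok_pos v; omega
    rcases hc with rfl | hc
    · exact h1
    · exact lt_trans h1 (ih _ _ hc)

lemma pvCums_pairwise (l : List String) (t : Int) :
    (pvCums l t).Pairwise (fun a b => a ≤ b) := by
  induction l generalizing t with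
  | nil => simp [pvCums]
  | cons v rest ih =>
    simp only [pvCums]
    exact List.Pairwise.cons (fun c hc => le_of_lt (pvCums_lt _ _ c hc)) (ih _)

lemma pvGoA_eq_take (M : Int) (l : List String) (sampled : List String) (tsum : Int) :
    pvGoA M l sampled tsum = sampled ++ l.take (pvCnt M l tsum) := by
  induction l generalizing sampled tsum with
  | nil => simp [pvGoA, pvCnt]
  | cons v rest ih =>
    simp only [pvGoA, pvCnt]
    split_ifs with h
    · simp
    · rw [ih]; simp

lemma pvCnt_le (M : Int) (l : List String) (t : Int) : pvCnt M l t ≤ l.length := by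
  induction l generalizing t with
  | nil => simp [pvCnt]
  | cons v rest ih =>
    simp only [pvCnt]
    split_ifs with h
    · simp
    · simpa using Nat.succ_le_succ (ih _)

lemma pvCnt_lo (M : Int) (l : List String) (t : Int) :
    ∀ j (hj : j < (pvCums l t).length), j < pvCnt M l t → (pvCums l t)[j] ≤ M := by
  induction l generalizing t with
  | nil => intro j hj; simp [pvCums] at hj
  | cons v rest ih =>
    intro j hj hjk
    simp only [pvCnt] at hjk
    simp only [pvCums] at hj ⊢
    split_ifs at hjk with h
    · omega
    · cases j with
      | zero => simpa using le_of_not_gt h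
      | succ j' =>
        simp only [List.getElem_cons_succ]
        exact ih _ j' (by simpa using hj) (by omega)

lemma pvCnt_hi (M : Int) (l : List String) (t : Int)
    (hk : pvCnt M l t < (pvCums l t).length) : M < (pvCums l t)[pvCnt M l t] := by
  induction l generalizing t with
  | nil => simp [pvCums] at hk
  | cons v rest ih =>
    simp only [pvCnt, pvCums, List.length_cons, length_pvCums] at hk ⊢
    split_ifs at hk ⊢ with h
    · simpa using h
    · simpa using ih (t + pvTok v) (by simp; omega)

lemma bisect_eq_pvCnt (M : Int) (l : List String) :
    PySem.List.bisectRight (pvCums l 0) M = pvCnt M l 0 := by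
  obtain ⟨hle, hlo, hhi⟩ := PySem.List.bisectRight_spec (pvCums l 0) M (pvCums_pairwise l 0)
  have hklen : pvCnt M l 0 ≤ (pvCums l 0).length := by
    simpa using pvCnt_le M l 0
  rcases lt_trichotomy (PySem.List.bisectRight (pvCums l 0) M) (pvCnt M l 0) with h | h | h
  · -- r < k: a[r] ≤ M by cnt_lo, but spec says M < a[r]
    have h1 := pvCnt_lo M l 0 _ (by omega) h
    have h2 := hhi _ (by omega) (le_refl _)
    exact absurd h1 (not_le.mpr h2)
  · exact h
  · -- k < r: a[k] ≤ M by spec, but cnt_hi says M < a[k]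
    have h1 := hlo _ (by omega) h
    have h2 := pvCnt_hi M l 0 (by omega)
    exact absurd h1 (not_le.mpr h2)

lemma sampled_eq (M : Int) (l : List String) :
    pvGoA M l [] 0 = PySem.List.slice l none (some ((PySem.List.bisectRight (pvCums l 0) M : Nat) : Int)) := by
  rw [PySem.List.slice_to_natCast, bisect_eq_pvCnt, pvGoA_eq_take]
  simp

-- ===== VERDICT (by name: the statement is the Claim_ definition above) =====
theorem token_aware_sample_spec : Claim_equal_token_aware_sample := by
  intro values max_tokens min_samples _
  unfold Spec_token_aware_sample token_aware_sample token_aware_sample_alt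
  simp only [sampled_eq]
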